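-- pv_equiv track=rewrite | github.com/JuanPabloGenetti/OntonixFCA | prealarm/Final Proyecto Saksak/hankelMatrixCreation.py | to_hankel
-- ===== SOURCE A (Python) =====
-- def to_hankel(arr):
--     n = len(arr)
--     hankel = [[0] * n for _ in range(n)]
--     for i in range(n):
--         for j in range(n):
--             if i + j < n:
--                 hankel[i][j] = arr[i + j]
--     return hankel
-- ===== SOURCE B (Python) =====
-- def to_hankel(arr):
--     # Row i of a Hankel matrix is arr shifted left by i, padded with zeros:
--     # build each row directly from a slice instead of testing i + j < n per cell.
--     n = len(arr)
--     return [list(arr[i:]) + [0] * i for i in range(n)]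
-- ===== Notes on version B (the rewrite author's own statement) =====
-- stated objective: faster
-- what changed: Replaces the per-cell guarded double loop (n^2 index tests and writes into a pre-built zero matrix) with a per-row construction: row i is the slice arr[i:] concatenated with i zeros, built in one comprehension.
import Mathlib
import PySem

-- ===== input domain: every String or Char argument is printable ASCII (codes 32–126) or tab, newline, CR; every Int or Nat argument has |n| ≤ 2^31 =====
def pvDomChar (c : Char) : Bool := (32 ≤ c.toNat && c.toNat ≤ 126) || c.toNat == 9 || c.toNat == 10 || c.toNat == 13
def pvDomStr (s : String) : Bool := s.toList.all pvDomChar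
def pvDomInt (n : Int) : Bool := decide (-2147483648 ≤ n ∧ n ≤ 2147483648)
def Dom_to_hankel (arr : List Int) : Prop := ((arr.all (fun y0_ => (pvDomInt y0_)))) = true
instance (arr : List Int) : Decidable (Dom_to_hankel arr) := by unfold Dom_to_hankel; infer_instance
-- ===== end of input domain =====

-- B builds each row as the slice arr[i:] padded with i zeros, instead of A's per-cell guarded double loop.

-- ===== PORT A =====
-- literal port of A: zero matrix, then for i in range(n): for j in range(n): if i+j<n: hankel[i][j] = arr[i+j]
-- pyGetD/pySetD are exact here: every access the loop performs is in range (0 ≤ i, j and i+j < n).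
def to_hankel (arr : List Int) : List (List Int) :=
  (PySem.List.pyRange 0 (arr.length : Int) 1).foldl (fun h i =>
    (PySem.List.pyRange 0 (arr.length : Int) 1).foldl (fun h j =>
      if i + j < (arr.length : Int) then
        PySem.List.pySetD h i ((PySem.List.pyGetD h i []).set j.toNat (PySem.List.pyGetD arr (i + j) 0))
      else h) h) (List.replicate arr.length (List.replicate arr.length 0))

-- ===== PORT B =====
-- literal port of Source B: [list(arr[i:]) + [0]*i for i in range(n)]
def to_hankel_alt (arr : List Int) : List (List Int) :=
  (PySem.List.pyRange 0 (arr.length : Int) 1).map (fun i =>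
    PySem.List.slice arr (some i) none ++ List.replicate i.toNat 0)

-- ===== PRECONDITION & SPEC =====
def Spec_to_hankel (arr : List Int) (out : List (List Int)) : Prop := out = to_hankel_alt arr
instance (arr : List Int) (out : List (List Int)) : Decidable (Spec_to_hankel arr out) := by unfold Spec_to_hankel; infer_instance

-- ===== CLAIM (what is proved, stated in full; the proofs are below) =====
def Claim_equal_to_hankel : Prop := ∀ (arr : List Int), Dom_to_hankel arr → Spec_to_hankel arr (to_hankel arr)

-- ===== LEMMAS AND PROOFS =====

-- A fold over range m that conditionally writes arr[i+j] into slot j of the row.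
theorem row_fold_eq_mapIdx (arr : List Int) (i : ℕ) :
    ∀ (m : ℕ) (r : List Int),
      (List.range m).foldl
        (fun (r : List Int) (j : ℕ) => if i + j < arr.length
                    then r.set j (arr.getD (i + j) 0) else r) r
      = r.mapIdx (fun j v => if j < m ∧ i + j < arr.length then arr.getD (i + j) 0 else v) := by
  intro m
  induction m with
  | zero =>
    intro r
    simp only [List.range_zero, List.foldl_nil]
    refine (List.ext_getElem (by simp) ?_).symm
    intro k h1 h2
    simp [List.getElem_mapIdx]
  | succ m ih =>
    intro r
    rw [List.range_succ, List.foldl_append, List.foldl_cons, List.foldl_nil, ih]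
    refine List.ext_getElem (by split_ifs <;> simp) ?_
    intro k h1 h2
    by_cases hc : i + m < arr.length
    · simp only [if_pos hc]
      rw [List.getElem_set]
      by_cases hk : m = k
      · subst hk
        simp only [List.length_mapIdx] at h2
        simp [List.getElem_mapIdx, hc]
      · rw [if_neg hk]
        simp only [List.length_mapIdx] at h2
        simp only [List.getElem_mapIdx]
        split_ifs <;> simp_all <;> omega
    · simp only [if_neg hc]
      simp only [List.length_mapIdx] at h2
      simp only [List.getElem_mapIdx]
      split_ifs <;> simp_all <;> omega

-- Inner matrix fold over j pins down row i of h and rewrites it with the row fold.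
theorem inner_fold_eq (arr : List Int) (i : ℕ) :
    ∀ (m : ℕ) (h : List (List Int)),
      (List.range m).foldl
        (fun (h : List (List Int)) (j : ℕ) => if i + j < arr.length
            then h.set i ((h.getD i []).set j (arr.getD (i + j) 0)) else h) h
      = h.set i ((List.range m).foldl
          (fun (r : List Int) (j : ℕ) => if i + j < arr.length
              then r.set j (arr.getD (i + j) 0) else r) (h.getD i [])) := by
  intro m
  induction m with
  | zero =>
    intro h
    simp only [List.range_zero, List.foldl_nil]
    by_cases hlen : i < h.length
    · rw [List.getD_eq_getElem h [] hlen, List.set_getElem_self]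
    · rw [List.set_eq_of_length_le (by omega)]
  | succ m ih =>
    intro h
    rw [List.range_succ]
    simp only [List.foldl_append, List.foldl_cons, List.foldl_nil]
    rw [ih h]
    by_cases hlen : i < h.length
    · have hget : (h.set i ((List.range m).foldl
          (fun (r : List Int) (j : ℕ) => if i + j < arr.length
              then r.set j (arr.getD (i + j) 0) else r) (h.getD i []))).getD i []
          = (List.range m).foldl
              (fun (r : List Int) (j : ℕ) => if i + j < arr.length
                  then r.set j (arr.getD (i + j) 0) else r) (h.getD i []) := by
        rw [List.getD_eq_getElem _ [] (by simpa using hlen)]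
        simp [List.getElem_set_self]
      split_ifs with hc
      · rw [hget, List.set_set]
      · rfl
    · split_ifs with hc
      · rw [List.set_eq_of_length_le (by simp; omega),
            List.set_eq_of_length_le (by omega), List.set_eq_of_length_le (by omega)]
      · rfl

-- Outer fold over i: each step replaces row i, so the whole fold is a mapIdx.
theorem outer_fold_eq (F : ℕ → List Int → List Int) :
    ∀ (m : ℕ) (h : List (List Int)),
      (List.range m).foldl (fun h i => h.set i (F i (h.getD i []))) h
      = h.mapIdx (fun i v => if i < m then F i v else v) := by
  intro m
  induction m with
  | zero =>
    intro h
    simp only [List.range_zero, List.foldl_nil]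
    refine (List.ext_getElem (by simp) ?_).symm
    intro k h1 h2
    simp [List.getElem_mapIdx]
  | succ m ih =>
    intro h
    rw [List.range_succ, List.foldl_append, List.foldl_cons, List.foldl_nil, ih]
    by_cases hm : m < h.length
    · rw [List.getD_eq_getElem _ [] (by simpa using hm)]
      refine List.ext_getElem (by simp) ?_
      intro k h1 h2
      rw [List.getElem_set]
      by_cases hk : m = k
      · subst hk
        simp only [List.length_mapIdx] at h2
        simp [List.getElem_mapIdx]
      · rw [if_neg hk]
        simp only [List.length_mapIdx] at h2
        simp only [List.getElem_mapIdx]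
        split_ifs <;> simp_all <;> omega
    · rw [List.set_eq_of_length_le (by simp; omega)]
      refine List.ext_getElem (by simp) ?_
      intro k h1 h2
      simp only [List.length_mapIdx] at h1
      simp only [List.getElem_mapIdx]
      split_ifs <;> simp_all <;> omega

-- The fully evaluated row i of A's matrix equals B's row: arr[i:] ++ i zeros.
theorem rowA_eq_rowB (arr : List Int) (i : ℕ) (hi : i < arr.length) :
    (List.replicate arr.length (0 : Int)).mapIdx
        (fun j v => if j < arr.length ∧ i + j < arr.length then arr.getD (i + j) 0 else v)
      = arr.drop i ++ List.replicate i 0 := by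
  refine List.ext_getElem (by simp; omega) ?_
  intro k h1 h2
  rw [List.getElem_mapIdx]
  simp only [List.length_mapIdx, List.length_replicate] at h1
  by_cases hk : i + k < arr.length
  · have hk2 : k < (arr.drop i).length := by simp; omega
    rw [List.getElem_append_left hk2]
    rw [if_pos (by omega : k < arr.length ∧ i + k < arr.length),
        List.getD_eq_getElem arr 0 hk, List.getElem_drop]
  · rw [List.getElem_append_right (by simp; omega)]
    rw [if_neg (by omega)]
    simp

-- A's ports in PySem primitives evaluates to the pure-Nat double fold.
theorem to_hankel_eval (arr : List Int) :
    to_hankel arr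
    = (List.range arr.length).foldl
        (fun (h : List (List Int)) (i : ℕ) =>
          (List.range arr.length).foldl
            (fun (h : List (List Int)) (j : ℕ) => if i + j < arr.length
                then h.set i ((h.getD i []).set j (arr.getD (i + j) 0)) else h) h)
        (List.replicate arr.length (List.replicate arr.length 0)) := by
  unfold to_hankel
  rw [PySem.List.pyRange_zero_natCast, List.foldl_map]
  congr 1
  funext h i
  rw [List.foldl_map]
  congr 1
  funext h j
  have hcast : (i : Int) + (j : Int) = ((i + j : ℕ) : Int) := by push_cast; ring
  rw [hcast]
  simp only [PySem.List.pySetD_natCast, PySem.List.pyGetD_natCast, Nat.cast_lt, Int.toNat_natCast]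

-- B's port evaluates to mapping rows over range.
theorem to_hankel_alt_eval (arr : List Int) :
    to_hankel_alt arr
    = (List.range arr.length).map (fun i => arr.drop i ++ List.replicate i 0) := by
  unfold to_hankel_alt
  rw [PySem.List.pyRange_zero_natCast, List.map_map]
  congr 1
  funext i
  simp [PySem.List.slice_from_natCast]

-- ===== VERDICT (by name: the statement is the Claim_ definition above) =====
theorem to_hankel_spec : Claim_equal_to_hankel := by
  intro arr _
  unfold Spec_to_hankel
  rw [to_hankel_eval, to_hankel_alt_eval]
  have hfun : (fun (h : List (List Int)) (i : ℕ) =>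
      (List.range arr.length).foldl
        (fun (h : List (List Int)) (j : ℕ) => if i + j < arr.length
            then h.set i ((h.getD i []).set j (arr.getD (i + j) 0)) else h) h)
      = (fun h i => h.set i
          ((List.range arr.length).foldl
            (fun (r : List Int) (j : ℕ) => if i + j < arr.length
                then r.set j (arr.getD (i + j) 0) else r) (h.getD i []))) := by
    funext h i
    exact inner_fold_eq arr i arr.length h
  rw [hfun, outer_fold_eq
    (fun i r => (List.range arr.length).foldl
      (fun (r : List Int) (j : ℕ) => if i + j < arr.length
          then r.set j (arr.getD (i + j) 0) else r) r)
    arr.length (List.replicate arr.length (List.replicate arr.length 0))]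
  refine List.ext_getElem (by simp) ?_
  intro k h1 h2
  simp only [List.length_mapIdx, List.length_replicate] at h1
  rw [List.getElem_mapIdx, List.getElem_map, List.getElem_range]
  simp only [List.getElem_replicate]
  rw [if_pos h1, row_fold_eq_mapIdx, rowA_eq_rowB arr k h1]
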